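-- pv_equiv track=rewrite | github.com/pinta-partners/DIVREYYOELtryaginuiforreplit | chassidic-ai/ingestion/chassidic_texts_sql/deprecated/0_faster_sql_to_csv.py | split_insert_columns
-- ===== SOURCE A (Python) =====
-- def split_insert_columns(row_content: str) -> list:
--     """
--     State-machine approach to split a single insert-values row into columns.
--     Improves upon the naive version by handling SQL-escaped single quotes: '' => one literal quote.
--     """
--     columns = []
--     current = []
--     in_quotes = False
--     i = 0
--     length = len(row_content)
--
--     while i < length:
--         c = row_content[i]
--
--         # Handle an escaped single quote '' => literal quote, don't toggle
--         # This is: if we see `'`, and the next char is `'`, treat as one literal `'`.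
--         if c == "'" and (i + 1 < length) and row_content[i + 1] == "'":
--             # It's an escaped quote => just add `'` to current text, skip next
--             current.append("'")
--             i += 2
--             continue
--
--         if c == "'":
--             # Toggle in_quotes
--             in_quotes = not in_quotes
--             current.append(c)
--         elif c == "," and not in_quotes:
--             # Column boundary
--             columns.append("".join(current).strip())
--             current = []
--         else:
--             current.append(c)
--
--         i += 1
--
--     # last column
--     if current:
--         columns.append("".join(current).strip())
--     return columns
-- ===== SOURCE B (Python) =====
-- def split_insert_columns(row_content: str) -> list:
--     """Split-based decomposition: cut the row at every single quote with str.split,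
--     walk the resulting segments (an empty inner segment between two quotes is an
--     escaped '' pair), and split only the unquoted segments on commas."""
--     parts = row_content.split("'")
--     last = len(parts) - 1
--     columns = []
--     buf = []
--     in_quotes = False
--     j = 0
--     while True:
--         part = parts[j]
--         if in_quotes:
--             buf.append(part)
--         else:
--             pieces = part.split(",")
--             buf.append(pieces[0])
--             for piece in pieces[1:]:
--                 columns.append("".join(buf).strip())
--                 buf = [piece]
--         if j == last:
--             break
--         if j + 1 < last and parts[j + 1] == "":
--             # the quote after this part is immediately followed by another quote: escaped ''
--             buf.append("'")
--             j += 2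
--         else:
--             buf.append("'")
--             in_quotes = not in_quotes
--             j += 1
--     if "".join(buf):
--         columns.append("".join(buf).strip())
--     return columns
-- ===== Notes on version B (the rewrite author's own statement) =====
-- stated objective: alternative
-- what changed: Instead of A's per-character state machine with i/i+1 lookahead, B first cuts the whole row at single quotes with str.split, classifies the resulting segments by parity/adjacency (an empty inner segment marks an escaped '' pair) and splits only the unquoted segments on commas with str.split.
import Mathlib
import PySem

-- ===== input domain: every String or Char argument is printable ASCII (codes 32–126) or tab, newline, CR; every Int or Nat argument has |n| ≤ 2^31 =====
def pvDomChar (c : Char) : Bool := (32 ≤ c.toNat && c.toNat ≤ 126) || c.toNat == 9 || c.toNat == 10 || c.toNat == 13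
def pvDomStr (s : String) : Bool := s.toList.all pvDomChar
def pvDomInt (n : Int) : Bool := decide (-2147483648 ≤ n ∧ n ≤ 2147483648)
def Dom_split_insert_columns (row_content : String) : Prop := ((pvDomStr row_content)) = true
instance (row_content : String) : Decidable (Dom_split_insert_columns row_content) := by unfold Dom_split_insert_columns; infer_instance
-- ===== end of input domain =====

-- B replaces A's per-character state machine (index lookahead for '') by a split-based
-- decomposition: cut the row at single quotes, classify segments (an empty inner segment
-- marks an escaped '' pair), split only unquoted segments on commas; objective: alternative.

-- ===== PORT A =====
-- A's while-loop: state (in_quotes, current, columns); the i/i+1 lookahead for "''" is the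
-- leading two-char pattern; trailing column appended only if current is non-empty.
def pvLoopA : List Char → Bool → List Char → List String → List String
  | '\'' :: '\'' :: rest, inq, cur, cols => pvLoopA rest inq (cur ++ ['\'']) cols
  | c :: rest, inq, cur, cols =>
    if c = '\'' then pvLoopA rest (!inq) (cur ++ [c]) cols
    else if c = ',' ∧ inq = false then pvLoopA rest inq [] (cols ++ [String.ofList (PySem.Chars.strip cur)])
    else pvLoopA rest inq (cur ++ [c]) cols
  | [], _, cur, cols => if cur.isEmpty then cols else cols ++ [String.ofList (PySem.Chars.strip cur)]

def split_insert_columns (row_content : String) : List String :=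
  pvLoopA row_content.toList false [] []

-- ===== PORT B =====
-- hand port of Python's str.split(sep) for a single-character separator (exact: keeps empties)
def pvSplit (sep : Char) : List Char → List (List Char)
  | [] => [[]]
  | c :: rest =>
    if c = sep then [] :: pvSplit sep rest
    else match pvSplit sep rest with
      | [] => [[c]]      -- unreachable: pvSplit never returns []
      | q :: qs => (c :: q) :: qs

-- B's processing of one quote-free segment: inside quotes it is appended verbatim;
-- outside it is split on commas, each comma flushing the stripped buffer as a column.
def pvProcessPart (p : List Char) (inq : Bool) (buf : List Char) (cols : List String) :
    List Char × List String :=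
  if inq then (buf ++ p, cols)
  else match pvSplit ',' p with
    | [] => (buf, cols)  -- unreachable
    | q :: qs =>
      qs.foldl (fun st piece => (piece, st.2 ++ [String.ofList (PySem.Chars.strip st.1)]))
        (buf ++ q, cols)

-- B's walk over the quote-separated segments: an empty segment that is not the last one
-- means the quote after the current segment is escaped (''); otherwise the quote toggles.
def pvLoopB : List (List Char) → Bool → List Char → List String → List String
  | [], _, _, cols => cols   -- unreachable: pvSplit output is nonempty
  | [p], inq, buf, cols =>
    let st := pvProcessPart p inq buf cols
    if st.1.isEmpty then st.2 else st.2 ++ [String.ofList (PySem.Chars.strip st.1)]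
  | p :: [] :: r :: rest, inq, buf, cols =>
    let st := pvProcessPart p inq buf cols
    pvLoopB (r :: rest) inq (st.1 ++ ['\'']) st.2
  | p :: q :: rest, inq, buf, cols =>
    let st := pvProcessPart p inq buf cols
    pvLoopB (q :: rest) (!inq) (st.1 ++ ['\'']) st.2

def split_insert_columns_alt (row_content : String) : List String :=
  pvLoopB (pvSplit '\'' row_content.toList) false [] []

-- ===== PRECONDITION & SPEC =====
def Spec_split_insert_columns (row_content : String) (out : List String) : Prop := out = split_insert_columns_alt row_content
instance (row_content : String) (out : List String) : Decidable (Spec_split_insert_columns row_content out) := by unfold Spec_split_insert_columns; infer_instance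

-- ===== CLAIM (what is proved, stated in full; the proofs are below) =====
def Claim_equal_split_insert_columns : Prop := ∀ (row_content : String), Dom_split_insert_columns row_content → Spec_split_insert_columns row_content (split_insert_columns row_content)

-- ===== LEMMAS AND PROOFS =====

theorem pvSplit_ne_nil (sep : Char) (cs : List Char) : pvSplit sep cs ≠ [] := by
  cases cs with
  | nil => simp [pvSplit]
  | cons c rest =>
    simp only [pvSplit]
    split_ifs
    · simp
    · cases h : pvSplit sep rest <;> simp

theorem pvProcessPart_nil (inq : Bool) (buf : List Char) (cols : List String) :
    pvProcessPart [] inq buf cols = (buf, cols) := by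
  cases inq <;> simp [pvProcessPart, pvSplit]

theorem pvProcessPart_cons_true (c : Char) (p buf : List Char) (cols : List String) :
    pvProcessPart (c :: p) true buf cols = pvProcessPart p true (buf ++ [c]) cols := by
  simp [pvProcessPart]

theorem pvProcessPart_cons_ne (c : Char) (hc : ¬ c = ',') (p buf : List Char) (cols : List String) :
    pvProcessPart (c :: p) false buf cols = pvProcessPart p false (buf ++ [c]) cols := by
  cases h : pvSplit ',' p with
  | nil => exact absurd h (pvSplit_ne_nil ',' p)
  | cons q qs => simp [pvProcessPart, pvSplit, hc, h]

theorem pvProcessPart_cons_comma (p buf : List Char) (cols : List String) :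
    pvProcessPart (',' :: p) false buf cols
      = pvProcessPart p false [] (cols ++ [String.ofList (PySem.Chars.strip buf)]) := by
  cases h : pvSplit ',' p with
  | nil => exact absurd h (pvSplit_ne_nil ',' p)
  | cons q qs => simp [pvProcessPart, pvSplit, h]

theorem pvLoopB_congr (ps : List (List Char)) (p p' : List Char) (inq : Bool)
    (buf buf' : List Char) (cols cols' : List String)
    (h : pvProcessPart p inq buf cols = pvProcessPart p' inq buf' cols') :
    pvLoopB (p :: ps) inq buf cols = pvLoopB (p' :: ps) inq buf' cols' := by
  match ps with
  | [] => simp only [pvLoopB, h]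
  | [] :: r :: rest => simp only [pvLoopB, h]
  | [] :: [] => simp only [pvLoopB, h]
  | (c :: q) :: rest => simp only [pvLoopB, h]

theorem pvLoopA_eq_loopB : ∀ (cs : List Char) (inq : Bool) (cur : List Char) (cols : List String),
    pvLoopA cs inq cur cols = pvLoopB (pvSplit '\'' cs) inq cur cols := by
  intro cs inq0 cur0 cols0
  fun_induction pvLoopA cs inq0 cur0 cols0 with
  | case1 rest inq cur cols ih =>
    -- "''" : escaped pair, no toggle
    cases h : pvSplit '\'' rest with
    | nil => exact absurd h (pvSplit_ne_nil _ _)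
    | cons r rs =>
      rw [ih, h]
      simp [pvSplit, h, pvLoopB, pvProcessPart_nil]
  | case2 rest inq cur cols x ih =>
    -- a lone quote (rest does not start with another quote): toggle
    rw [ih]
    cases rest with
    | nil => simp [pvSplit, pvLoopB, pvProcessPart_nil]
    | cons c2 rest2 =>
      have hc2 : ¬ c2 = '\'' := fun hh => x rest2 rfl (by rw [hh])
      cases h : pvSplit '\'' rest2 with
      | nil => exact absurd h (pvSplit_ne_nil _ _)
      | cons r rs => simp [pvSplit, hc2, h, pvLoopB, pvProcessPart_nil]
  | case3 c rest inq cur cols x h1 h2 ih =>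
    -- comma outside quotes: flush the column
    obtain ⟨hc, hq⟩ := h2
    subst hc; subst hq
    rw [ih]
    cases h : pvSplit '\'' rest with
    | nil => exact absurd h (pvSplit_ne_nil _ _)
    | cons r rs =>
      have hs : pvSplit '\'' (',' :: rest) = (',' :: r) :: rs := by simp [pvSplit, h]
      rw [hs]
      exact (pvLoopB_congr rs (',' :: r) r false cur []
        cols (cols ++ [String.ofList (PySem.Chars.strip cur)])
        (pvProcessPart_cons_comma r cur cols)).symm
  | case4 c rest inq cur cols x h1 h2 ih =>
    -- ordinary character: append to the buffer
    rw [ih]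
    cases h : pvSplit '\'' rest with
    | nil => exact absurd h (pvSplit_ne_nil _ _)
    | cons r rs =>
      have hs : pvSplit '\'' (c :: rest) = (c :: r) :: rs := by simp [pvSplit, h1, h]
      rw [hs]
      refine (pvLoopB_congr rs (c :: r) r inq cur (cur ++ [c]) cols cols ?_).symm
      cases inq with
      | true => exact pvProcessPart_cons_true c r cur cols
      | false => exact pvProcessPart_cons_ne c (fun hc => h2 ⟨hc, rfl⟩) r cur cols
  | case5 inq cur cols h => simp [pvSplit, pvLoopB, pvProcessPart_nil, h]
  | case6 inq cur cols h => simp [pvSplit, pvLoopB, pvProcessPart_nil, h]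

-- ===== VERDICT (by name: the statement is the Claim_ definition above) =====
theorem split_insert_columns_spec : Claim_equal_split_insert_columns := by
  intro row_content _
  unfold Spec_split_insert_columns split_insert_columns split_insert_columns_alt
  exact pvLoopA_eq_loopB _ _ _ _
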